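-- pv_equiv track=rewrite | github.com/FSoft-AI4Code/RepoExec | test-apps/apimd/apimd/parser.py | doctest
-- ===== SOURCE A (Python) =====
-- def doctest(doc: str) -> str:
--     """Wrap doctest as markdown Python code."""
--     keep = False
--     docs = []
--     lines = doc.splitlines()
--     for i, line in enumerate(lines):
--         signed = line.startswith(">>> ")
--         if signed:
--             if not keep:
--                 docs.append("```python")
--                 keep = True
--         elif keep:
--             docs.append("```")
--             keep = False
--         docs.append(line)
--         if signed and i == len(lines) - 1:
--             docs.append("```")
--             keep = False
--     return '\n'.join(docs)
-- ===== SOURCE B (Python) =====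
-- def doctest(doc: str) -> str:
--     """Wrap doctest as markdown Python code (run-grouping rewrite)."""
--     lines = doc.splitlines()
--     out = []
--     i, n = 0, len(lines)
--     while i < n:
--         signed = lines[i].startswith(">>> ")
--         j = i
--         while j < n and lines[j].startswith(">>> ") == signed:
--             j += 1
--         if signed:
--             out.append("```python")
--             out.extend(lines[i:j])
--             out.append("```")
--         else:
--             out.extend(lines[i:j])
--         i = j
--     return '\n'.join(out)
-- ===== Notes on version B (the rewrite author's own statement) =====
-- stated objective: simpler
-- what changed: Replaced A's transition-based single pass with a stateful keep flag and a special last-line fence close by a run-grouping pass that consumes each maximal run of same-signedness lines at once and wraps signed runs in fences.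
import Mathlib
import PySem

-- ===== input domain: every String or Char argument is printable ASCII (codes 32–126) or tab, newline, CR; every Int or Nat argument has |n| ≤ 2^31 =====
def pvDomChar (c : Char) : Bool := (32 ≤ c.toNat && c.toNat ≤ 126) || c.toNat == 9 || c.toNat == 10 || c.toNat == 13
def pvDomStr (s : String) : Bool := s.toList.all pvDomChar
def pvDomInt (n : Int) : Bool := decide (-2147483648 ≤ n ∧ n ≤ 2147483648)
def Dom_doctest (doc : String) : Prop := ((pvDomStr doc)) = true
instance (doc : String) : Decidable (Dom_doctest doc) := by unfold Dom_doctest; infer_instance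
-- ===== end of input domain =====

-- B replaces A's stateful `keep` flag and last-line fence close by a run-grouping
-- single pass (objective: simpler decomposition, same cost).

-- ===== PORT A =====
-- one loop-body step of A's for-loop: state = (keep, docs), element = (i, line)
def doctestStep (n : Int) (st : Bool × List String) (p : Int × String) : Bool × List String :=
  let keep := st.1
  let docs := st.2
  let line := p.2
  let signed := PySem.Str.startswith line ">>> "
  let st1 : Bool × List String :=
    if signed then
      (if !keep then (true, docs ++ ["```python"]) else (keep, docs))
    else if keep then (false, docs ++ ["```"]) else (keep, docs)
  let docs2 := st1.2 ++ [line]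
  if signed && (p.1 == n - 1) then (false, docs2 ++ ["```"]) else (st1.1, docs2)

def doctest (doc : String) : String :=
  PySem.Str.join "\n"
    (((PySem.List.enumerate (PySem.Str.splitlines doc)).foldl
        (doctestStep ((PySem.Str.splitlines doc).length : Int)) (false, [])).2)

-- ===== PORT B =====
-- B's outer while-loop: consume one maximal run of same-signedness lines per iteration
def doctestRuns : List String → List String
  | [] => []
  | l :: ls =>
    let signed := PySem.Str.startswith l ">>> "
    let pred := fun x => PySem.Str.startswith x ">>> " == signed
    let run := (l :: ls).takeWhile pred
    let rest := (l :: ls).dropWhile pred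
    (if signed then "```python" :: (run ++ ["```"]) else run) ++ doctestRuns rest
  termination_by lines => lines.length
  decreasing_by
    simp only [List.dropWhile_cons, beq_self_eq_true, if_true]
    exact Nat.lt_succ_of_le (List.length_dropWhile_le _ _)

def doctest_alt (doc : String) : String :=
  PySem.Str.join "\n" (doctestRuns (PySem.Str.splitlines doc))

-- ===== PRECONDITION & SPEC =====
def Spec_doctest (doc : String) (out : String) : Prop := out = doctest_alt doc
instance (doc : String) (out : String) : Decidable (Spec_doctest doc out) := by unfold Spec_doctest; infer_instance

-- ===== CLAIM (what is proved, stated in full; the proofs are below) =====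
def Claim_equal_doctest : Prop := ∀ (doc : String), Dom_doctest doc → Spec_doctest doc (doctest doc)

-- ===== LEMMAS AND PROOFS =====

-- A's loop as structural recursion ("last line" = empty tail), proof helper only
def aRec (keep : Bool) : List String → List String → List String
  | [], docs => docs
  | l :: ls, docs =>
    let signed := PySem.Str.startswith l ">>> "
    let docs1 := if signed then (if !keep then docs ++ ["```python"] else docs)
                 else if keep then docs ++ ["```"] else docs
    let keep1 := if signed then true else false
    let docs2 := docs1 ++ [l]
    if signed && ls.isEmpty then docs2 ++ ["```"] else aRec keep1 ls docs2

lemma foldl_eq_aRec (n : Int) :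
    ∀ (lines : List String) (s : Int) (keep : Bool) (docs : List String),
      s + lines.length = n →
      ((PySem.List.enumerate lines s).foldl (doctestStep n) (keep, docs)).2
        = aRec keep lines docs := by
  intro lines
  induction lines with
  | nil => intro s keep docs h; simp [PySem.List.enumerate_nil, aRec]
  | cons l ls ih =>
    intro s keep docs h
    rw [PySem.List.enumerate_cons, List.foldl_cons]
    have hlast : (s == n - 1) = ls.isEmpty := by
      cases ls with
      | nil => simp at h ⊢; omega
      | cons a as =>
        simp only [List.isEmpty_cons]
        simp only [List.length_cons] at h
        have : s ≠ n - 1 := by push_cast at h; omega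
        simp [this]
    simp only [doctestStep, aRec, hlast]
    by_cases hs : PySem.Str.startswith l ">>> " = true
    · simp only [hs, Bool.true_and, if_true]
      cases hE : ls.isEmpty with
      | true =>
        have : ls = [] := List.isEmpty_iff.mp hE
        subst this
        cases keep <;> simp [PySem.List.enumerate_nil]
      | false =>
        cases keep <;> simp <;>
          exact ih (s + 1) _ _ (by simp at h ⊢; omega)
    · simp only [Bool.not_eq_true] at hs
      simp only [hs, Bool.false_and, Bool.false_eq_true, if_false]
      cases keep <;> simp <;>
        exact ih (s + 1) _ _ (by simp at h ⊢; omega)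

lemma runs_drop :
    ∀ ls : List String,
      ls.takeWhile (fun x => PySem.Str.startswith x ">>> " == false)
        ++ doctestRuns (ls.dropWhile (fun x => PySem.Str.startswith x ">>> " == false))
      = doctestRuns ls := by
  intro ls
  induction ls with
  | nil => simp [doctestRuns]
  | cons a as ih =>
    rw [List.takeWhile_cons, List.dropWhile_cons]
    by_cases ha : PySem.Str.startswith a ">>> " = true
    · rw [if_neg (by rw [ha]; decide), if_neg (by rw [ha]; decide), List.nil_append]
    · simp only [Bool.not_eq_true] at ha
      rw [if_pos (by rw [ha]; decide), if_pos (by rw [ha]; decide)]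
      conv_rhs => rw [doctestRuns]
      rw [if_neg (by rw [ha]; decide)]
      rw [List.takeWhile_cons, List.dropWhile_cons]
      rw [if_pos (by rw [ha]; decide), if_pos (by rw [ha]; decide)]
      rw [List.cons_append, ih, ha, List.cons_append, ih]

lemma runs_cons_unsigned {l : String} {ls : List String}
    (h : PySem.Str.startswith l ">>> " = false) :
    doctestRuns (l :: ls) = l :: doctestRuns ls := by
  rw [doctestRuns]
  simp only [h, Bool.false_eq_true, if_false]
  rw [List.takeWhile_cons, List.dropWhile_cons]
  simp only [h, beq_self_eq_true, if_true]
  rw [List.cons_append, runs_drop ls]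

lemma runs_cons_signed {l : String} {ls : List String}
    (h : PySem.Str.startswith l ">>> " = true) :
    doctestRuns (l :: ls) =
      "```python" :: l :: (ls.takeWhile (fun x => PySem.Str.startswith x ">>> " == true) ++ ["```"]
        ++ doctestRuns (ls.dropWhile (fun x => PySem.Str.startswith x ">>> " == true))) := by
  rw [doctestRuns]
  simp only [h, if_true]
  rw [List.takeWhile_cons, List.dropWhile_cons]
  simp only [h, beq_self_eq_true, if_true]
  simp

lemma aRec_eq_runs :
    ∀ (lines : List String),
      (∀ docs, aRec false lines docs = docs ++ doctestRuns lines) ∧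
      (lines ≠ [] → ∀ docs, aRec true lines docs =
        docs ++ (lines.takeWhile (fun x => PySem.Str.startswith x ">>> " == true) ++ ["```"]
          ++ doctestRuns (lines.dropWhile (fun x => PySem.Str.startswith x ">>> " == true)))) := by
  intro lines
  induction lines with
  | nil => exact ⟨fun docs => by simp [aRec, doctestRuns], fun h => absurd rfl h⟩
  | cons l ls ih =>
    obtain ⟨ihP, ihQ⟩ := ih
    by_cases hs : PySem.Str.startswith l ">>> " = true
    · constructor
      · intro docs
        rw [aRec, runs_cons_signed hs]
        simp only [hs, Bool.not_false, if_true, Bool.true_and]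
        cases hE : ls.isEmpty with
        | true =>
          have : ls = [] := List.isEmpty_iff.mp hE
          subst this
          simp [doctestRuns]
        | false =>
          have hne : ls ≠ [] := by simpa [List.isEmpty_iff] using hE
          simp only [Bool.false_eq_true, if_false]
          rw [ihQ hne]
          simp
      · intro _ docs
        rw [aRec]
        simp only [hs, Bool.not_true, if_true, Bool.true_and]
        rw [List.takeWhile_cons, List.dropWhile_cons]
        simp only [hs, beq_self_eq_true, if_true]
        cases hE : ls.isEmpty with
        | true =>
          have : ls = [] := List.isEmpty_iff.mp hE
          subst this
          simp [doctestRuns]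
        | false =>
          have hne : ls ≠ [] := by simpa [List.isEmpty_iff] using hE
          simp only [Bool.false_eq_true, if_false]
          rw [ihQ hne]
          simp
    · simp only [Bool.not_eq_true] at hs
      constructor
      · intro docs
        rw [aRec, runs_cons_unsigned hs]
        simp only [hs, Bool.false_eq_true, if_false, Bool.false_and]
        rw [ihP (docs ++ [l])]
        simp
      · intro _ docs
        rw [aRec]
        simp only [hs, Bool.false_eq_true, if_false, if_true, Bool.false_and]
        rw [List.takeWhile_cons, List.dropWhile_cons,
            if_neg (by rw [hs]; decide), if_neg (by rw [hs]; decide),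
            ihP (docs ++ ["```"] ++ [l]), runs_cons_unsigned hs]
        simp

-- ===== VERDICT (by name: the statement is the Claim_ definition above) =====
theorem doctest_spec : Claim_equal_doctest := by
  intro doc _
  unfold Spec_doctest doctest doctest_alt
  rw [foldl_eq_aRec ((PySem.Str.splitlines doc).length : Int)
    (PySem.Str.splitlines doc) 0 false [] (by simp)]
  rw [(aRec_eq_runs (PySem.Str.splitlines doc)).1 []]
  simp
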